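-- pv_equiv track=rewrite | github.com/axellbrendow/leetcode | python/minimum-unique-word-abbreviation.py | get_abbreviation
-- ===== SOURCE A (Python) =====
-- def get_abbreviation(word, mask):
--     abbr = ''
--     count = 0
--     for i in range(len(word)):
--         if mask & 1 == 1:
--             count += 1
--         else:
--             if count > 0:
--                 abbr += str(count)
--             abbr += word[i]
--             count = 0
--         mask >>= 1
--     if count > 0:
--         abbr += str(count)
--     return abbr
-- ===== SOURCE B (Python) =====
-- def get_abbreviation(word, mask):
--     keep = [(mask >> i) & 1 == 1 for i in range(len(word))]
--     pieces = []
--     i, n = 0, len(word)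
--     while i < n:
--         j = i
--         while j < n and keep[j] == keep[i]:
--             j += 1
--         pieces.append(str(j - i) if keep[i] else word[i:j])
--         i = j
--     return ''.join(pieces)
-- ===== Notes on version B (the rewrite author's own statement) =====
-- stated objective: alternative
-- what changed: Replaces the char-by-char count/flush accumulator with a precomputed keep-bit list followed by a run-grouping scan that emits each maximal run at once (length for kept runs, a slice for literal runs).
import Mathlib
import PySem

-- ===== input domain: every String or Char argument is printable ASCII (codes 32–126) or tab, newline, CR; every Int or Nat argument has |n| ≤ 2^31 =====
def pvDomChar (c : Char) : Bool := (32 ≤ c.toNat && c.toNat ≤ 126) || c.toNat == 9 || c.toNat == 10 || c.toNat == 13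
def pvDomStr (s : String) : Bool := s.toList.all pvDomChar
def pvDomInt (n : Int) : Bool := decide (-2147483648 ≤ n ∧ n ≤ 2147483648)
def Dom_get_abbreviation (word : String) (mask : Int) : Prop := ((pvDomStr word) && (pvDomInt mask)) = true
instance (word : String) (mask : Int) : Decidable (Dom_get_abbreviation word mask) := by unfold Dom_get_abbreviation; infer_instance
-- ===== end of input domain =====

-- B replaces A's char-by-char count/flush accumulator with a precomputed keep-bit list
-- and a run-grouping scan emitting each maximal run at once (alternative decomposition, same cost).

-- ===== PORT A =====
-- the for-loop of A: state (abbr, count), mask shifted right each step; 'mask & 1' = 'mask % 2'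
def pvLoopA : List Char → Int → String → Int → String
  | [], _, abbr, count => if count > 0 then abbr ++ PySem.Int.toStr count else abbr
  | c :: cs, mask, abbr, count =>
    if PySem.Int.mod mask 2 == 1 then
      pvLoopA cs (PySem.Int.floordiv mask 2) abbr (count + 1)
    else
      pvLoopA cs (PySem.Int.floordiv mask 2)
        ((if count > 0 then abbr ++ PySem.Int.toStr count else abbr) ++ String.ofList [c]) 0

def get_abbreviation (word : String) (mask : Int) : String :=
  pvLoopA word.toList mask "" 0

-- ===== PORT B =====
-- keep[i] = (mask >> i) & 1 == 1
def pvKeep (mask : Int) (n : Nat) : List Bool :=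
  (List.range n).map (fun i => PySem.Int.mod (PySem.Int.floordiv mask (2 ^ i)) 2 == 1)

-- the grouping scan of Source B: each step consumes one maximal run of equal flags
def pvEmit : List (Char × Bool) → String
  | [] => ""
  | (c, b) :: rest =>
    (if b then PySem.Int.toStr (1 + ((rest.takeWhile (fun p => p.2 == b)).length : Int))
     else String.ofList (c :: (rest.takeWhile (fun p => p.2 == b)).map Prod.fst))
      ++ pvEmit (rest.dropWhile (fun p => p.2 == b))
termination_by l => l.length
decreasing_by
  have h := (List.dropWhile_sublist (p := fun p => p.2 == b) (l := rest)).length_le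
  simpa using Nat.lt_succ_of_le h

def get_abbreviation_alt (word : String) (mask : Int) : String :=
  pvEmit (word.toList.zip (pvKeep mask word.toList.length))

-- ===== PRECONDITION & SPEC =====
def Spec_get_abbreviation (word : String) (mask : Int) (out : String) : Prop := out = get_abbreviation_alt word mask
instance (word : String) (mask : Int) (out : String) : Decidable (Spec_get_abbreviation word mask out) := by unfold Spec_get_abbreviation; infer_instance

-- ===== CLAIM (what is proved, stated in full; the proofs are below) =====
def Claim_equal_get_abbreviation : Prop := ∀ (word : String) (mask : Int), Dom_get_abbreviation word mask → Spec_get_abbreviation word mask (get_abbreviation word mask)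

-- ===== LEMMAS AND PROOFS =====

-- the flag stream read head-first: (c, mask % 2 == 1), then the tail with mask // 2
def pvPairs : List Char → Int → List (Char × Bool)
  | [], _ => []
  | c :: cs, m => (c, PySem.Int.mod m 2 == 1) :: pvPairs cs (PySem.Int.floordiv m 2)

-- pvEmit with a pending kept-run of length k already absorbed
def pvEmitK (k : Nat) (ps : List (Char × Bool)) : String :=
  if k = 0 then pvEmit ps
  else PySem.Int.toStr ((k + (ps.takeWhile (fun p => p.2 == true)).length : Nat) : Int)
        ++ pvEmit (ps.dropWhile (fun p => p.2 == true))

theorem pvOfList_append (l1 l2 : List Char) :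
    String.ofList (l1 ++ l2) = String.ofList l1 ++ String.ofList l2 := by
  apply String.toList_injective
  simp

theorem pvFloordiv_floordiv (m : Int) (i : Nat) :
    PySem.Int.floordiv (PySem.Int.floordiv m 2) (2 ^ i) = PySem.Int.floordiv m (2 ^ (i + 1)) := by
  rw [PySem.Int.floordiv_eq_ediv_of_pos (a := PySem.Int.floordiv m 2) (b := (2:Int) ^ i) (by positivity),
      PySem.Int.floordiv_eq_ediv_of_pos (a := m) (b := 2) (by norm_num),
      PySem.Int.floordiv_eq_ediv_of_pos (a := m) (b := (2:Int) ^ (i + 1)) (by positivity),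
      Int.ediv_ediv_of_nonneg (by norm_num), pow_succ, mul_comm]

theorem pvKeep_succ (m : Int) (n : Nat) :
    pvKeep m (n + 1) = (PySem.Int.mod m 2 == 1) :: pvKeep (PySem.Int.floordiv m 2) n := by
  unfold pvKeep
  rw [List.range_succ_eq_map, List.map_cons, List.map_map]
  congr 1
  · norm_num [PySem.Int.floordiv_eq_ediv_of_pos (a := m) (b := (1:Int)) one_pos]
  · exact List.map_congr_left (fun i _ => by
      simp only [Function.comp_apply, pvFloordiv_floordiv])

theorem pvZip_keep (ws : List Char) (m : Int) :
    ws.zip (pvKeep m ws.length) = pvPairs ws m := by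
  induction ws generalizing m with
  | nil => simp [pvKeep, pvPairs]
  | cons c cs ih =>
    rw [List.length_cons, pvKeep_succ, List.zip_cons_cons, ih]
    rfl

theorem pvLoopA_prefix (ws : List Char) (m : Int) (abbr : String) (k : Int) :
    pvLoopA ws m abbr k = abbr ++ pvLoopA ws m "" k := by
  induction ws generalizing m abbr k with
  | nil =>
    simp only [pvLoopA]
    split <;> simp
  | cons c cs ih =>
    simp only [pvLoopA]
    split
    · exact ih _ _ _
    · conv_rhs => rw [ih]
      rw [ih]
      split <;> simp [String.append_assoc]

-- pvEmit flattens a literal (false-flag) run char by char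
theorem pvEmit_flat (ps : List (Char × Bool)) :
    pvEmit ps = String.ofList ((ps.takeWhile (fun p => p.2 == false)).map Prod.fst)
        ++ pvEmit (ps.dropWhile (fun p => p.2 == false)) := by
  match ps with
  | [] => simp [pvEmit]
  | (d, true) :: qs => simp
  | (d, false) :: qs =>
    rw [pvEmit]
    simp

theorem pvEmit_false_cons (c : Char) (rest : List (Char × Bool)) :
    pvEmit ((c, false) :: rest) = String.ofList [c] ++ pvEmit rest := by
  rw [pvEmit, pvEmit_flat rest,
    show (c :: (rest.takeWhile (fun p => p.2 == false)).map Prod.fst)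
       = [c] ++ (rest.takeWhile (fun p => p.2 == false)).map Prod.fst from rfl,
    pvOfList_append]
  rw [if_neg (show ¬ (false = true) by decide), String.append_assoc]

theorem pvLoopA_emitK (ws : List Char) (m : Int) (k : Nat) :
    pvLoopA ws m "" ((k : Nat) : Int) = pvEmitK k (pvPairs ws m) := by
  induction ws generalizing m k with
  | nil =>
    simp only [pvLoopA, pvPairs, pvEmitK]
    match k with
    | 0 => simp [pvEmit]
    | j + 1 => simp [pvEmit]
  | cons c cs ih =>
    simp only [pvLoopA, pvPairs]
    by_cases hb : (PySem.Int.mod m 2 == 1) = true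
    · rw [if_pos hb, hb]
      have hc : ((k : Nat) : Int) + 1 = (((k + 1 : Nat) : Nat) : Int) := by push_cast; ring
      rw [hc, ih (PySem.Int.floordiv m 2) (k + 1)]
      simp only [pvEmitK]
      match k with
      | 0 =>
        rw [if_pos rfl, if_neg (Nat.succ_ne_zero 0), pvEmit]
        norm_num
      | j + 1 =>
        rw [if_neg (Nat.succ_ne_zero j), if_neg (Nat.succ_ne_zero (j + 1))]
        have ht : List.takeWhile (fun p => p.2 == true) ((c, true) :: pvPairs cs (PySem.Int.floordiv m 2))
            = (c, true) :: List.takeWhile (fun p => p.2 == true) (pvPairs cs (PySem.Int.floordiv m 2)) := by simp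
        have hd : List.dropWhile (fun p => p.2 == true) ((c, true) :: pvPairs cs (PySem.Int.floordiv m 2))
            = List.dropWhile (fun p => p.2 == true) (pvPairs cs (PySem.Int.floordiv m 2)) := by simp
        rw [ht, hd, List.length_cons]
        congr 2
        omega
    · rw [if_neg hb]
      have hb' : (PySem.Int.mod m 2 == 1) = false := by simpa using hb
      rw [hb', pvLoopA_prefix]
      have h0 := ih (PySem.Int.floordiv m 2) 0
      rw [Nat.cast_zero] at h0
      rw [h0]
      simp only [pvEmitK]
      match k with
      | 0 =>
        rw [pvEmit_false_cons]
        simp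
      | j + 1 =>
        rw [if_neg (Nat.succ_ne_zero j)]
        simp only [List.takeWhile_cons, List.dropWhile_cons]
        norm_num
        rw [pvEmit_false_cons, String.append_assoc]

-- ===== VERDICT (by name: the statement is the Claim_ definition above) =====
theorem get_abbreviation_spec : Claim_equal_get_abbreviation := by
  intro word mask _
  unfold Spec_get_abbreviation get_abbreviation get_abbreviation_alt
  rw [pvZip_keep]
  have h := pvLoopA_emitK word.toList mask 0
  simpa [pvEmitK] using h
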